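-- pv_equiv track=rewrite | github.com/Ujjwal-sinha/News-Summarization-and-Text-to-Speech-Application | utils.py | escape_ffmpeg_text
-- ===== SOURCE A (Python) =====
-- def escape_ffmpeg_text(text):
--     if not isinstance(text, str):
--         raise TypeError("Input must be a string")
--     if not text:
--         return ""
--     escape_chars = {
--         '\\': '\\\\', ':': '\\:', "'": "\\'", ',': '\\,', '%': '\\%', '\n': ' ',
--         '"': '\\"', '=': '\\=', '[': '\\[', ']': '\\]', '{': '\\{', '}': '\\}',
--         '$': '\\$', '#': '\\#', '@': '\\@', '&': '\\&'
--     }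
--     result = text
--     for char, escaped in escape_chars.items():
--         result = result.replace(char, escaped)
--     if len(result) > 200:
--         result = result[:200].rsplit(' ', 1)[0] + '...'
--     return result.strip()
-- ===== SOURCE B (Python) =====
-- _ESCAPE_TABLE = str.maketrans({
--     '\\': '\\\\', ':': '\\:', "'": "\\'", ',': '\\,', '%': '\\%', '\n': ' ',
--     '"': '\\"', '=': '\\=', '[': '\\[', ']': '\\]', '{': '\\{', '}': '\\}',
--     '$': '\\$', '#': '\\#', '@': '\\@', '&': '\\&'
-- })
--
-- def escape_ffmpeg_text(text):
--     if not isinstance(text, str):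
--         raise TypeError("Input must be a string")
--     if not text:
--         return ""
--     result = text.translate(_ESCAPE_TABLE)
--     if len(result) > 200:
--         result = result[:200].rsplit(' ', 1)[0] + '...'
--     return result.strip()
-- ===== Notes on version B (the rewrite author's own statement) =====
-- stated objective: idiomatic
-- what changed: Replaces the chain of 16 sequential str.replace passes with a single per-character translation via str.translate(str.maketrans(...)), built once; the truncation and strip tail is unchanged.
import Mathlib
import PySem

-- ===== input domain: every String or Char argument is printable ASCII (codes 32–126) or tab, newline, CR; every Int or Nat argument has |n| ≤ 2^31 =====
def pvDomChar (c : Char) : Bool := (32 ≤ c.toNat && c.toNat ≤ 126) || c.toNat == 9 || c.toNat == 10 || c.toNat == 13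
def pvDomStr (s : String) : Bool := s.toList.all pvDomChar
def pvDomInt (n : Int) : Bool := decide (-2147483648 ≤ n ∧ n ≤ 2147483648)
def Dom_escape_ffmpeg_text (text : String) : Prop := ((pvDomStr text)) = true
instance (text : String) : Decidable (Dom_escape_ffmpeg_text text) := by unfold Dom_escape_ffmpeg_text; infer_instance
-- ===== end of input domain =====

-- B replaces A's chain of 16 sequential str.replace passes by one per-character
-- translation (str.translate) — the idiomatic form; the truncation/strip tail is
-- identical Python in both and is shared below as pvTruncStrip.

-- ===== PORT A =====
-- hand port of `cs.rsplit(' ', 1)[0]` (no rsplit in PySem; exact: the prefix before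
-- the LAST space, or cs itself when there is no space)
def pvRsplit1Head (cs : List Char) : List Char :=
  let i := PySem.Chars.rfind cs [' ']
  if i = -1 then cs else cs.take i.toNat

-- the tail both Pythons share verbatim: `if len(result) > 200: result =
-- result[:200].rsplit(' ', 1)[0] + '...'` followed by `return result.strip()`
def pvTruncStrip (cs : List Char) : String :=
  let r := if cs.length > 200 then
      pvRsplit1Head (PySem.Chars.slice cs none (some 200)) ++ ['.', '.', '.']
    else cs
  String.ofList (PySem.Chars.strip r)

-- A's escape_chars dict, in insertion order
def pvEscPairs : List (Char × List Char) :=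
  [('\\', ['\\', '\\']), (':', ['\\', ':']), ('\'', ['\\', '\'']), (',', ['\\', ',']),
   ('%', ['\\', '%']), ('\n', [' ']), ('"', ['\\', '"']), ('=', ['\\', '=']),
   ('[', ['\\', '[']), (']', ['\\', ']']), ('{', ['\\', '{']), ('}', ['\\', '}']),
   ('$', ['\\', '$']), ('#', ['\\', '#']), ('@', ['\\', '@']), ('&', ['\\', '&'])]

def escape_ffmpeg_text (text : String) : String :=
  if text = "" then ""
  else
    -- `for char, escaped in escape_chars.items(): result = result.replace(char, escaped)`
    let result := pvEscPairs.foldl (fun r p => PySem.Chars.replace r [p.1] p.2) text.toList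
    pvTruncStrip result

-- ===== PORT B =====
-- the translation table of Source B (str.maketrans of the same mapping), as a per-character
-- expansion: translate maps each character independently (hand port; exact)
def pvEscChar (c : Char) : List Char :=
  if c = '\\' then ['\\', '\\'] else if c = ':' then ['\\', ':']
  else if c = '\'' then ['\\', '\''] else if c = ',' then ['\\', ',']
  else if c = '%' then ['\\', '%'] else if c = '\n' then [' ']
  else if c = '"' then ['\\', '"'] else if c = '=' then ['\\', '=']
  else if c = '[' then ['\\', '['] else if c = ']' then ['\\', ']']
  else if c = '{' then ['\\', '{'] else if c = '}' then ['\\', '}']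
  else if c = '$' then ['\\', '$'] else if c = '#' then ['\\', '#']
  else if c = '@' then ['\\', '@'] else if c = '&' then ['\\', '&']
  else [c]

def escape_ffmpeg_text_alt (text : String) : String :=
  if text = "" then ""
  else
    -- `result = text.translate(_ESCAPE_TABLE)`: one pass, each char expanded independently
    let result := text.toList.flatMap pvEscChar
    pvTruncStrip result

-- ===== PRECONDITION & SPEC =====
def Spec_escape_ffmpeg_text (text : String) (out : String) : Prop := out = escape_ffmpeg_text_alt text
instance (text : String) (out : String) : Decidable (Spec_escape_ffmpeg_text text out) := by unfold Spec_escape_ffmpeg_text; infer_instance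

-- ===== CLAIM (what is proved, stated in full; the proofs are below) =====
def Claim_equal_escape_ffmpeg_text : Prop := ∀ (text : String), Dom_escape_ffmpeg_text text → Spec_escape_ffmpeg_text text (escape_ffmpeg_text text)

-- ===== LEMMAS AND PROOFS =====

-- a single-character str.replace is exactly a per-character expansion
lemma replace_go_single (c : Char) (new : List Char) :
    ∀ (l : List Char) (fuel : Nat) (acc : List Char), l.length ≤ fuel →
      PySem.Chars.replace.go [c] new fuel l acc
        = acc.reverse ++ l.flatMap (fun x => if x = c then new else [x]) := by
  intro l
  induction l with
  | nil =>
    intro fuel acc _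
    cases fuel <;> simp [PySem.Chars.replace.go]
  | cons x t ih =>
    intro fuel acc h
    cases fuel with
    | zero => simp at h
    | succ fuel =>
      rw [PySem.Chars.replace.go]
      by_cases hx : x = c
      · subst hx
        simp only [List.isPrefixOf, BEq.rfl, Bool.and_self, if_pos, List.length_cons,
          List.length_nil, List.drop_succ_cons, List.drop_zero]
        rw [ih fuel _ (by simpa using h)]
        simp
      · have hpre : ([c].isPrefixOf (x :: t)) = false := by
          simp [List.isPrefixOf]
          exact fun hcx => hx hcx.symm
        simp only [hpre, Bool.false_eq_true, if_false]
        rw [ih fuel _ (by simpa using h)]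
        simp [hx]

lemma replace_single (s : List Char) (c : Char) (new : List Char) :
    PySem.Chars.replace s [c] new = s.flatMap (fun x => if x = c then new else [x]) := by
  rw [PySem.Chars.replace]
  simp [replace_go_single c new s s.length [] le_rfl]

-- the fold of sequential replaces, rewritten pass by pass as per-character expansions
lemma foldl_rep_eq (ps : List (Char × List Char)) (cs : List Char) :
    ps.foldl (fun r p => PySem.Chars.replace r [p.1] p.2) cs
      = ps.foldl (fun r p => r.flatMap (fun x => if x = p.1 then p.2 else [x])) cs := by
  induction ps generalizing cs with
  | nil => rfl
  | cons p ps ih => rw [List.foldl_cons, List.foldl_cons, replace_single]; exact ih _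

lemma chainG_nil (ps : List (Char × List Char)) :
    ps.foldl (fun r p => r.flatMap (fun x => if x = p.1 then p.2 else [x])) [] = [] := by
  induction ps with
  | nil => rfl
  | cons p ps ih => simpa using ih

lemma chainG_append (ps : List (Char × List Char)) (a b : List Char) :
    ps.foldl (fun r p => r.flatMap (fun x => if x = p.1 then p.2 else [x])) (a ++ b)
      = ps.foldl (fun r p => r.flatMap (fun x => if x = p.1 then p.2 else [x])) a
        ++ ps.foldl (fun r p => r.flatMap (fun x => if x = p.1 then p.2 else [x])) b := by
  induction ps generalizing a b with
  | nil => rfl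
  | cons p ps ih =>
    rw [List.foldl_cons, List.flatMap_append]
    exact ih _ _

lemma chain_single (x : Char) :
    pvEscPairs.foldl (fun r p => r.flatMap (fun y => if y = p.1 then p.2 else [y])) [x]
      = pvEscChar x := by
  by_cases h1 : x = '\\'; · subst h1; decide
  by_cases h2 : x = ':'; · subst h2; decide
  by_cases h3 : x = '\''; · subst h3; decide
  by_cases h4 : x = ','; · subst h4; decide
  by_cases h5 : x = '%'; · subst h5; decide
  by_cases h6 : x = '\n'; · subst h6; decide
  by_cases h7 : x = '"'; · subst h7; decide
  by_cases h8 : x = '='; · subst h8; decide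
  by_cases h9 : x = '['; · subst h9; decide
  by_cases h10 : x = ']'; · subst h10; decide
  by_cases h11 : x = '{'; · subst h11; decide
  by_cases h12 : x = '}'; · subst h12; decide
  by_cases h13 : x = '$'; · subst h13; decide
  by_cases h14 : x = '#'; · subst h14; decide
  by_cases h15 : x = '@'; · subst h15; decide
  by_cases h16 : x = '&'; · subst h16; decide
  simp [pvEscPairs, pvEscChar, h1, h2, h3, h4, h5, h6, h7, h8, h9, h10, h11, h12,
    h13, h14, h15, h16]

-- the 16 sequential passes compose into B's single per-character pass
lemma chain_eq (cs : List Char) :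
    pvEscPairs.foldl (fun r p => PySem.Chars.replace r [p.1] p.2) cs
      = cs.flatMap pvEscChar := by
  rw [foldl_rep_eq]
  induction cs with
  | nil => rw [chainG_nil]; rfl
  | cons x t ih =>
    have : x :: t = [x] ++ t := rfl
    rw [this, chainG_append, ih, chain_single, List.flatMap_append,
      List.flatMap_cons, List.flatMap_nil, List.append_nil]

-- ===== VERDICT (by name: the statement is the Claim_ definition above) =====
theorem escape_ffmpeg_text_spec : Claim_equal_escape_ffmpeg_text := by
  intro text _
  unfold Spec_escape_ffmpeg_text escape_ffmpeg_text escape_ffmpeg_text_alt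
  by_cases h : text = ""
  · simp [h]
  · simp only [h, if_false, chain_eq]
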